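-- pv_equiv track=rewrite | github.com/s1366560/agi-demos | src/infrastructure/agent/workspace_plan/supervisor.py | _pipeline_status_from_refs
-- ===== SOURCE A (Python) =====
-- def _pipeline_status_from_refs(refs: list[str]) -> tuple[str | None, str | None]:
--     status: str | None = None
--     run_id: str | None = None
--     if "ci_pipeline:passed" in refs:
--         status = "success"
--     elif "ci_pipeline:failed" in refs:
--         status = "failed"
--     for ref in refs:
--         if ref.startswith("pipeline_run:success:"):
--             status = "success"
--             run_id = ref.removeprefix("pipeline_run:success:")
--         elif ref.startswith("pipeline_run:failed:"):
--             status = "failed"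
--             run_id = ref.removeprefix("pipeline_run:failed:")
--     return status, run_id
-- ===== SOURCE B (Python) =====
-- def _pipeline_status_from_refs(refs: list[str]) -> tuple[str | None, str | None]:
--     for ref in reversed(refs):
--         if ref.startswith("pipeline_run:success:"):
--             return "success", ref.removeprefix("pipeline_run:success:")
--         if ref.startswith("pipeline_run:failed:"):
--             return "failed", ref.removeprefix("pipeline_run:failed:")
--     if "ci_pipeline:passed" in refs:
--         return "success", None
--     if "ci_pipeline:failed" in refs:
--         return "failed", None
--     return None, None
-- ===== Notes on version B (the rewrite author's own statement) =====
-- stated objective: alternative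
-- what changed: Replaces A's full forward fold that keeps the last pipeline_run match with an early-exit reverse scan that returns on the first match, moving the ci_pipeline membership fallback after the scan.
import Mathlib
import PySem

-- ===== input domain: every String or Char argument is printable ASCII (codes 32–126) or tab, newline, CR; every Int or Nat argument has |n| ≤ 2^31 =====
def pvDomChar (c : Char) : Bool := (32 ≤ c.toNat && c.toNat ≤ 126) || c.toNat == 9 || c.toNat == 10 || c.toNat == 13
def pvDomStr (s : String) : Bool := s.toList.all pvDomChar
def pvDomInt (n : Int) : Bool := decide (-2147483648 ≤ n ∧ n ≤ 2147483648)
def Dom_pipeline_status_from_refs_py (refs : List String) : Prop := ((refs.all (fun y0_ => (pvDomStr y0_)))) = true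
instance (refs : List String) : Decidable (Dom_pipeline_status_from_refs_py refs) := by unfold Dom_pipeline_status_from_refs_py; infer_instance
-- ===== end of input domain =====

-- B is an alternative decomposition: early-exit reverse scan instead of A's full forward fold.

-- ===== PORT A =====
-- Python removeprefix, exact: drop the prefix's chars iff the string starts with it
def pyRemovePrefix (s p : String) : String :=
  if PySem.Str.startswith s p then String.mk (s.toList.drop p.toList.length) else s

def stepA (st : Option String × Option String) (ref : String) : Option String × Option String :=
  if PySem.Str.startswith ref "pipeline_run:success:" then
    (some "success", some (pyRemovePrefix ref "pipeline_run:success:"))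
  else if PySem.Str.startswith ref "pipeline_run:failed:" then
    (some "failed", some (pyRemovePrefix ref "pipeline_run:failed:"))
  else st

def pipeline_status_from_refs_py (refs : List String) : Option String × Option String :=
  let status0 : Option String :=
    if refs.contains "ci_pipeline:passed" then some "success"
    else if refs.contains "ci_pipeline:failed" then some "failed"
    else none
  refs.foldl stepA (status0, none)

-- ===== PORT B =====
-- scan of the (already reversed) list, returning on the first pipeline_run match
def scanB : List String → Option (String × String)
  | [] => none
  | ref :: rest =>
    if PySem.Str.startswith ref "pipeline_run:success:" then
      some ("success", pyRemovePrefix ref "pipeline_run:success:")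
    else if PySem.Str.startswith ref "pipeline_run:failed:" then
      some ("failed", pyRemovePrefix ref "pipeline_run:failed:")
    else scanB rest

def pipeline_status_from_refs_py_alt (refs : List String) : Option String × Option String :=
  match scanB refs.reverse with
  | some (s, r) => (some s, some r)
  | none =>
    if refs.contains "ci_pipeline:passed" then (some "success", none)
    else if refs.contains "ci_pipeline:failed" then (some "failed", none)
    else (none, none)

-- ===== PRECONDITION & SPEC =====
def Spec_pipeline_status_from_refs_py (refs : List String) (out : Option String × Option String) : Prop := out = pipeline_status_from_refs_py_alt refs
instance (refs : List String) (out : Option String × Option String) : Decidable (Spec_pipeline_status_from_refs_py refs out) := by unfold Spec_pipeline_status_from_refs_py; infer_instance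

-- ===== CLAIM (what is proved, stated in full; the proofs are below) =====
def Claim_equal_pipeline_status_from_refs_py : Prop := ∀ (refs : List String), Dom_pipeline_status_from_refs_py refs → Spec_pipeline_status_from_refs_py refs (pipeline_status_from_refs_py refs)

-- ===== LEMMAS AND PROOFS =====
theorem foldl_stepA_eq_scanB (refs : List String) (init : Option String × Option String) :
    refs.foldl stepA init =
      match scanB refs.reverse with
      | some (s, r) => (some s, some r)
      | none => init := by
  induction refs using List.reverseRecOn with
  | nil => simp [scanB]
  | append_singleton l x ih =>
    rw [List.foldl_append, List.foldl_cons, List.foldl_nil, List.reverse_append]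
    simp only [List.reverse_singleton, List.singleton_append, scanB, stepA]
    split_ifs <;> simp [ih]

-- ===== VERDICT (by name: the statement is the Claim_ definition above) =====
theorem pipeline_status_from_refs_py_spec : Claim_equal_pipeline_status_from_refs_py := by
  intro refs _
  unfold Spec_pipeline_status_from_refs_py pipeline_status_from_refs_py pipeline_status_from_refs_py_alt
  rw [foldl_stepA_eq_scanB]
  cases h : scanB refs.reverse with
  | none => split_ifs <;> rfl
  | some p => simp
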